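-- pv_equiv track=rewrite | github.com/vamsikrishna07/Amazon-OA | getCountOfPairs.py | getMaximumPairs
-- ===== SOURCE A (Python) =====
-- import bisect
--
-- def getMaximumPairs( group1, group2 ):
--     res, n = 0, len(group1)
--     diffs = [ group1[i]-group2[i] for i in range(n) ]
--     diffs.sort()
--
--     for diff in diffs:
--         x = bisect.bisect_right( diffs, -diff )
--         res += n-x
--     return res
-- ===== SOURCE B (Python) =====
-- def getMaximumPairs(group1, group2):
--     diffs = sorted(a - b for a, b in zip(group1, group2))
--     n = len(diffs)
--     left, right = 0, n - 1
--     u = 0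
--     while left < right:
--         if diffs[left] + diffs[right] > 0:
--             u += right - left
--             right -= 1
--         else:
--             left += 1
--     s = sum(1 for d in diffs if d > 0)
--     return 2 * u + s
-- ===== Notes on version B (the rewrite author's own statement) =====
-- stated objective: alternative
-- what changed: Replaces the per-element binary search (bisect_right once for every diff) by a single linear two-pointer sweep over the sorted diffs counting unordered pairs U plus a count S of positive diffs, returning 2*U+S which equals A's ordered self-inclusive pair count.
import Mathlib
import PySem

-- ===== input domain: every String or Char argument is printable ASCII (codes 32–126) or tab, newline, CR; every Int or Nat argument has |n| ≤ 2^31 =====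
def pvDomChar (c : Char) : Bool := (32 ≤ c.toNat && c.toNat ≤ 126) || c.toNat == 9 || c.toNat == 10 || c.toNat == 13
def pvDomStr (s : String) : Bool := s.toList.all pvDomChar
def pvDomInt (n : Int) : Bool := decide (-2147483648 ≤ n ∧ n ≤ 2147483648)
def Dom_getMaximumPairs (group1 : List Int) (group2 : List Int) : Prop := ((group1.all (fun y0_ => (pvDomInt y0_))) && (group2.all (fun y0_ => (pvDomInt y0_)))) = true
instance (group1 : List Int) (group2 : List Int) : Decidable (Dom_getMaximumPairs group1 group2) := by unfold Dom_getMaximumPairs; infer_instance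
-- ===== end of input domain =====

-- B replaces A's per-element bisect_right by a two-pointer sweep (2*U+S); same result, same O(n log n) cost.

-- ===== PORT A =====
def getMaximumPairs (group1 : List Int) (group2 : List Int) : Int :=
  let n := group1.length
  let diffs := (PySem.List.pyRange 0 (n : Int) 1).map
      (fun i => PySem.List.pyGetD group1 i 0 - PySem.List.pyGetD group2 i 0)
  let sdiffs := PySem.List.sorted diffs (fun x => x) false
  sdiffs.foldl (fun res diff =>
    res + ((n : Int) - (PySem.List.bisectRight sdiffs (-diff) : Int))) 0

-- ===== PORT B =====
-- the while loop of Source B (left/right pointers over the sorted diffs)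
def twoPtr (diffs : List Int) (left right : Nat) (u : Int) : Int :=
  if _h : left < right then
    if 0 < diffs.getD left 0 + diffs.getD right 0 then
      twoPtr diffs left (right - 1) (u + ((right : Int) - (left : Int)))
    else
      twoPtr diffs (left + 1) right u
  else u
termination_by right - left
decreasing_by all_goals omega

def getMaximumPairs_alt (group1 : List Int) (group2 : List Int) : Int :=
  let diffs := PySem.List.sorted ((group1.zip group2).map (fun p => p.1 - p.2)) (fun x => x) false
  let n := diffs.length
  let u := twoPtr diffs 0 (n - 1) 0
  let s : Int := diffs.countP (fun d => 0 < d)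
  2 * u + s

-- ===== PRECONDITION & SPEC =====
-- A indexes group2 at every i < len(group1): it raises IndexError iff group2 is shorter than group1.
def Pre_getMaximumPairs (group1 : List Int) (group2 : List Int) : Prop := group1.length ≤ group2.length
instance (group1 : List Int) (group2 : List Int) : Decidable (Pre_getMaximumPairs group1 group2) := by unfold Pre_getMaximumPairs; infer_instance
def pvWitness_getMaximumPairs : List Int × List Int := ([1, -2, 3], [0, 0, -1])

def Spec_getMaximumPairs (group1 : List Int) (group2 : List Int) (out : Int) : Prop := out = getMaximumPairs_alt group1 group2
instance (group1 : List Int) (group2 : List Int) (out : Int) : Decidable (Spec_getMaximumPairs group1 group2 out) := by unfold Spec_getMaximumPairs; infer_instance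

-- ===== CLAIM (what is proved, stated in full; the proofs are below) =====
def Claim_equal_getMaximumPairs : Prop := ∀ (group1 : List Int) (group2 : List Int), Dom_getMaximumPairs group1 group2 → Pre_getMaximumPairs group1 group2 → Spec_getMaximumPairs group1 group2 (getMaximumPairs group1 group2)
-- ===== LEMMAS AND PROOFS =====

-- number of unordered pairs i<j with sum > 0 (specification of Source B's while loop)
def Uspec : List Int → Nat
  | [] => 0
  | x :: t => t.countP (fun y => 0 < x + y) + Uspec t

lemma Uspec_append_singleton (t : List Int) (z : Int) :
    Uspec (t ++ [z]) = Uspec t + t.countP (fun y => 0 < y + z) := by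
  induction t with
  | nil => simp [Uspec]
  | cons x t ih =>
    simp only [List.cons_append, Uspec, ih, List.countP_append, List.countP_cons,
      List.countP_nil]
    have h : decide (0 < x + z) = decide (0 < z + x) := by
      simp only [decide_eq_decide]; omega
    rw [h]; omega

-- On a sorted list, bisect_right x returns the number of elements ≤ x.
lemma bisect_count (l : List Int) (v : Int) (h : l.Pairwise (· ≤ ·)) :
    l.countP (fun x => x ≤ v) = PySem.List.bisectRight l v := by
  obtain ⟨hle, hlo, hhi⟩ := PySem.List.bisectRight_spec l v h
  set k := PySem.List.bisectRight l v with hk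
  calc l.countP (fun x => x ≤ v)
      = (l.take k).countP (fun x => x ≤ v) + (l.drop k).countP (fun x => x ≤ v) := by
        rw [← List.countP_append, List.take_append_drop]
    _ = k := by
        have h1 : (l.take k).countP (fun x => x ≤ v) = (l.take k).length := by
          apply List.countP_eq_length.mpr
          intro a ha
          obtain ⟨i, hi, rfl⟩ := List.getElem_of_mem ha
          have hi' : i < k ∧ i < l.length := by simp [List.length_take] at hi; omega
          simp only [List.getElem_take]
          exact decide_eq_true (hlo i hi'.2 hi'.1)
        have h2 : (l.drop k).countP (fun x => x ≤ v) = 0 := by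
          apply List.countP_eq_zero.mpr
          intro a ha
          obtain ⟨i, hi, rfl⟩ := List.getElem_of_mem ha
          have hi' : k + i < l.length := by simp [List.length_drop] at hi; omega
          simp only [List.getElem_drop]
          have := hhi (k + i) hi' (by omega)
          simp; omega
        rw [h1, h2, List.length_take]
        omega

-- ordered self-inclusive pair count = 2 * unordered pairs + positive diagonal
lemma double_count (l : List Int) :
    ((l.map (fun d => (l.countP (fun x => 0 < d + x) : Int))).sum)
      = 2 * (Uspec l : Int) + (l.countP (fun d => 0 < d) : Int) := by
  induction l with
  | nil => simp [Uspec]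
  | cons x t ih =>
    simp only [List.map_cons, List.sum_cons, Uspec]
    have hmap : (t.map (fun d => ((x :: t).countP (fun y => 0 < d + y) : Int))).sum
        = (t.map (fun d => (t.countP (fun y => 0 < d + y) : Int))).sum
          + (t.countP (fun y => 0 < x + y) : Int) := by
      have hstep : ∀ d ∈ t, ((x :: t).countP (fun y => 0 < d + y) : Int)
          = (t.countP (fun y => 0 < d + y) : Int)
            + (if (fun y => decide (0 < x + y)) d = true then (1:Int) else 0) := by
        intro d _
        simp only [List.countP_cons]
        have : decide (0 < d + x) = decide (0 < x + d) := by
          simp only [decide_eq_decide]; omega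
        rw [this]
        push_cast
        split_ifs with h <;> simp_all
      rw [List.map_congr_left hstep, PySem.List.sum_map_add_int,
        PySem.List.sum_map_ite_one_zero]
    rw [hmap, ih]
    have hxx : decide (0 < x + x) = decide (0 < x) := by
      simp only [decide_eq_decide]; omega
    simp only [List.countP_cons, hxx]
    push_cast
    split_ifs <;> ring_nf

-- the two-pointer sweep computes Uspec of the window [left, right]
lemma twoPtr_inv (l : List Int)
    (hmono : ∀ p q : Nat, p ≤ q → q < l.length → l.getD p 0 ≤ l.getD q 0) :
    ∀ (d left right : Nat) (u : Int), right - left = d → left ≤ right → right < l.length →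
      twoPtr l left right u = u + (Uspec ((l.drop left).take (right + 1 - left)) : Int) := by
  intro d
  induction d with
  | zero =>
    intro left right u hd hlr hrl
    have : left = right := by omega
    subst this
    rw [twoPtr]
    simp only [Nat.lt_irrefl, dite_false]
    have h1 : List.take 1 (List.drop left l) = [l[left]'hrl] := by
      rw [List.drop_eq_getElem_cons hrl, List.take_succ_cons, List.take_zero]
    simp [h1, Uspec]
  | succ d ih =>
    intro left right u hd hlr hrl
    have hlt : left < right := by omega
    rw [twoPtr]
    simp only [hlt, dite_true]
    split_ifs with hc
    · rw [ih left (right - 1) (u + ((right : Int) - (left : Int))) (by omega) (by omega) (by omega)]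
      have hwin : (l.drop left).take (right + 1 - left)
          = (l.drop left).take (right - left) ++ [l[right]'hrl] := by
        rw [show right + 1 - left = (right - left) + 1 by omega, List.take_add_one]
        congr 1
        have hlen : right - left < (l.drop left).length := by simp; omega
        rw [List.getElem?_eq_getElem hlen]
        simp only [List.getElem_drop, Option.toList_some]
        congr 2; omega
      rw [hwin, Uspec_append_singleton]
      have hcount : ((l.drop left).take (right - left)).countP (fun y => 0 < y + l[right]'hrl)
          = ((l.drop left).take (right - left)).length := by
        apply List.countP_eq_length.mpr
        intro a ha
        obtain ⟨i, hi, rfl⟩ := List.getElem_of_mem ha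
        have hiub : left + i < right := by simp [List.length_take] at hi; omega
        simp only [List.getElem_take, List.getElem_drop]
        have h1 : l.getD left 0 ≤ l.getD (left + i) 0 := hmono left (left + i) (by omega) (by omega)
        rw [List.getD_eq_getElem l 0 (by omega : left < l.length),
          List.getD_eq_getElem l 0 (by omega : left + i < l.length)] at h1
        rw [List.getD_eq_getElem l 0 (by omega : left < l.length),
          List.getD_eq_getElem l 0 hrl] at hc
        simp only [decide_eq_true_eq]
        omega
      rw [hcount]
      have hlen2 : ((l.drop left).take (right - left)).length = right - left := by simp; omega
      rw [hlen2, show right - 1 + 1 - left = right - left by omega]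
      push_cast [Int.natCast_sub (by omega : left ≤ right)]
      ring
    · rw [ih (left + 1) right u (by omega) (by omega) hrl]
      have hwin : (l.drop left).take (right + 1 - left)
          = l[left]'(by omega) :: (l.drop (left + 1)).take (right - left) := by
        rw [List.drop_eq_getElem_cons (by omega : left < l.length),
          show right + 1 - left = (right - left) + 1 by omega]
        rw [List.take_succ_cons]
      rw [hwin]
      have hzero : ((l.drop (left + 1)).take (right - left)).countP
          (fun y => 0 < l[left]'(by omega : left < l.length) + y) = 0 := by
        apply List.countP_eq_zero.mpr
        intro a ha
        obtain ⟨i, hi, rfl⟩ := List.getElem_of_mem ha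
        have hiub : left + 1 + i ≤ right := by simp [List.length_take] at hi; omega
        simp only [List.getElem_take, List.getElem_drop]
        have h1 : l.getD (left + 1 + i) 0 ≤ l.getD right 0 := hmono _ _ (by omega) (by omega)
        rw [List.getD_eq_getElem l 0 hrl,
          List.getD_eq_getElem l 0 (by omega : left + 1 + i < l.length)] at h1
        rw [List.getD_eq_getElem l 0 (by omega : left < l.length),
          List.getD_eq_getElem l 0 hrl] at hc
        simp only [decide_eq_true_eq]
        omega
      simp only [Uspec, hzero, show right + 1 - (left + 1) = right - left by omega]
      push_cast
      ring

-- under Pre_, A's diffs list equals B's zip-built diffs list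
lemma diffs_eq (g1 g2 : List Int) (h : g1.length ≤ g2.length) :
    (PySem.List.pyRange 0 (g1.length : Int) 1).map
        (fun i => PySem.List.pyGetD g1 i 0 - PySem.List.pyGetD g2 i 0)
      = (g1.zip g2).map (fun p => p.1 - p.2) := by
  rw [PySem.List.pyRange_zero_natCast, List.map_map]
  apply List.ext_getElem
  · simp; omega
  · intro i h1 h2
    simp only [List.getElem_map, Function.comp_apply]
    have hi1 : i < g1.length := by simpa using h1
    have hi2 : i < g2.length := by omega
    rw [List.getElem_zip]
    simp [PySem.List.pyGetD_natCast, List.getD_eq_getElem?_getD,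
      List.getElem?_eq_getElem hi1, List.getElem?_eq_getElem hi2]

-- B's value in closed form
lemma alt_closed (g1 g2 : List Int) :
    getMaximumPairs_alt g1 g2
      = 2 * (Uspec (PySem.List.sorted ((g1.zip g2).map (fun p => p.1 - p.2)) (fun x => x) false) : Int)
        + ((PySem.List.sorted ((g1.zip g2).map (fun p => p.1 - p.2)) (fun x => x) false).countP (fun d => 0 < d) : Int) := by
  unfold getMaximumPairs_alt
  set l := PySem.List.sorted ((g1.zip g2).map (fun p => p.1 - p.2)) (fun x => x) false with hl
  simp only []
  congr 1
  rcases hnil : l with _ | ⟨x, t⟩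
  · simp [twoPtr, Uspec]
  · have hmono : ∀ p q : Nat, p ≤ q → q < l.length → l.getD p 0 ≤ l.getD q 0 := by
      intro p q hpq hq
      rw [List.getD_eq_getElem l 0 hq, List.getD_eq_getElem l 0 (by omega)]
      exact PySem.List.sorted_id_getElem_mono _ hpq hq
    have hlen : (x :: t).length - 1 = t.length := by simp
    rw [← hnil]
    have hpos : 0 < l.length := by rw [hnil]; simp
    rw [twoPtr_inv l hmono (l.length - 1) 0 (l.length - 1) 0 rfl (by omega) (by omega)]
    rw [List.drop_zero, show l.length - 1 + 1 - 0 = l.length by omega, List.take_length]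
    ring

theorem getMaximumPairs_spec : Claim_equal_getMaximumPairs := by
  intro g1 g2 _hdom hpre
  unfold Spec_getMaximumPairs
  unfold getMaximumPairs
  simp only []
  rw [diffs_eq g1 g2 hpre]
  set l := PySem.List.sorted ((g1.zip g2).map (fun p => p.1 - p.2)) (fun x => x) false with hl
  have hpair : l.Pairwise (· ≤ ·) := by
    simpa using PySem.List.sorted_pairwise ((g1.zip g2).map (fun p => p.1 - p.2)) (fun x => x)
  have hlen : l.length = g1.length := by
    rw [hl, PySem.List.length_sorted]
    simp [Nat.min_eq_left hpre]
  rw [PySem.List.foldl_add]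
  have hcongr : ∀ d ∈ l, ((g1.length : Int) - (PySem.List.bisectRight l (-d) : Int))
      = (l.countP (fun x => 0 < d + x) : Int) := by
    intro d _
    rw [← bisect_count l (-d) hpair]
    have hnot := List.length_eq_countP_add_countP (l := l) (p := fun x => decide (x ≤ -d))
    have heq : l.countP (fun a => decide (¬ (decide (a ≤ -d) = true))) = l.countP (fun x => 0 < d + x) := by
      apply List.countP_congr
      intro y _
      simp only [decide_eq_true_eq, decide_not, Bool.not_eq_true', decide_eq_false_iff_not]
      omega
    rw [heq] at hnot
    omega
  rw [List.map_congr_left hcongr, double_count l, alt_closed, ← hl]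
  ring
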